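-- pv_equiv track=rewrite | github.com/felixcringe/bachelor_thesis | Codes ZDR Detection/utilities/att_cor_tools.py | get_va_containing_hs_inds
-- ===== SOURCE A (Python) =====
-- def get_va_containing_hs_inds(valid_areas, hotspots, verbose=False):
--     """
--     Marks valid_areas, which contain hotspots.
--
--     Arguments:
--         valid_areas:    list-like object, containing list-like objects of indices of radials, which are considered to contain weather echoes.
--         hotspots:       list-like object, containg list-like objects of indices of radials, which are considered to be hotspots.
--     Parameters:
--         verbose:        bool, if True print some warnings. Default: False
--     Returns:
--         i_va_with_hs:   list, length is equal to valid_areas. Each entry is either a None, if no hotspot is present in this area or a list of hotspot-indices, which are present in that area.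
--     """
--     inds_valid_areas_with_hs = [None] * len(valid_areas)
--     for i,hotspot in enumerate(hotspots):
--         r_1 = hotspot[0]
--         r_2 = hotspot[-1]
--         for j,area in enumerate(valid_areas):
--             if r_1 in area and r_2 in area:
--                 if inds_valid_areas_with_hs[j] is None:
--                     inds_valid_areas_with_hs[j] = []
--                 inds_valid_areas_with_hs[j].append(i)
--                 break
--         else:
--             if verbose: print ( "WARNING: hotspot (%s, %s) not in valid areas!" % (r_1, r_2) )
--             pass # hotspots which are out of valid areas will not be computed
--     return inds_valid_areas_with_hs
-- ===== SOURCE B (Python) =====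
-- def get_va_containing_hs_inds(valid_areas, hotspots, verbose=False):
--     # Build an index: radial value -> strictly increasing list of area indices containing it.
--     index = {}
--     for j, area in enumerate(valid_areas):
--         for r in area:
--             lst = index.setdefault(r, [])
--             if not lst or lst[-1] != j:
--                 lst.append(j)
--     res = [None] * len(valid_areas)
--     for i, hotspot in enumerate(hotspots):
--         j = _first_common(index.get(hotspot[0], []), index.get(hotspot[-1], []))
--         if j is None:
--             if verbose: print ( "WARNING: hotspot (%s, %s) not in valid areas!" % (hotspot[0], hotspot[-1]) )
--         else:
--             if res[j] is None:
--                 res[j] = []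
--             res[j].append(i)
--     return res
--
-- def _first_common(xs, ys):
--     # smallest common element of two strictly increasing lists, two-pointer
--     a, b = 0, 0
--     while a < len(xs) and b < len(ys):
--         if xs[a] == ys[b]:
--             return xs[a]
--         elif xs[a] < ys[b]:
--             a += 1
--         else:
--             b += 1
--     return None
-- ===== Notes on version B (the rewrite author's own statement) =====
-- stated objective: faster
-- what changed: B builds a radial->sorted-area-index map once and finds each hotspot's first containing area as the smallest common index of its two endpoints' lists via a two-pointer merge, instead of A's per-hotspot linear scan over all areas with 'in' membership tests.
import Mathlib
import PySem

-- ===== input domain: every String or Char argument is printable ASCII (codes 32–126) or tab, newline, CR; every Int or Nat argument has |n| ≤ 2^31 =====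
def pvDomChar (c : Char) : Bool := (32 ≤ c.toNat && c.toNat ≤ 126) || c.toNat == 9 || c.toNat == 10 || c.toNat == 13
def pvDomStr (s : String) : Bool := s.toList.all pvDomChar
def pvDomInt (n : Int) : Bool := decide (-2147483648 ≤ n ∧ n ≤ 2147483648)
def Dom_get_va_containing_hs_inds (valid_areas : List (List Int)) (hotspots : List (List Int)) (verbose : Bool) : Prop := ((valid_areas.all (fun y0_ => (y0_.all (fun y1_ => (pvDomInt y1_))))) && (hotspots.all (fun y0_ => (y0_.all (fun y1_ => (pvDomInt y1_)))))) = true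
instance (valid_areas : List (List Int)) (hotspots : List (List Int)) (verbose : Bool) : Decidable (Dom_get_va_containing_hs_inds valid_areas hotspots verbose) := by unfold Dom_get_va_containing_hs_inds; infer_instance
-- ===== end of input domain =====

-- B replaces A's per-hotspot scan of all areas by a radial→area-indices index plus a
-- two-pointer smallest-common-index search per hotspot (objective: faster, asymptotic).

-- ===== PORT A =====
-- inner 'for j,area in enumerate(valid_areas): … break' (first area containing both endpoints)
def findFirstA (r1 r2 : Int) : List (List Int) → Nat → Option Nat
  | [], _ => none
  | area :: rest, j => if r1 ∈ area ∧ r2 ∈ area then some j else findFirstA r1 r2 rest (j + 1)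

-- 'if res[j] is None: res[j] = []; res[j].append(i)'
def markAt (res : List (Option (List Int))) (j : Nat) (i : Int) : List (Option (List Int)) :=
  res.set j (some (((res.getD j none).getD []) ++ [i]))

def get_va_containing_hs_inds (valid_areas : List (List Int)) (hotspots : List (List Int)) (verbose : Bool) : List (Option (List Int)) :=
  (PySem.List.enumerate hotspots 0).foldl (fun res p =>
    match PySem.List.pyGet? p.2 0, PySem.List.pyGet? p.2 (-1) with
    | some r1, some r2 =>
      match findFirstA r1 r2 valid_areas 0 with
      | some j => markAt res j p.1
      | none => res   -- verbose only prints
    | _, _ => res)    -- hotspot[0]/hotspot[-1] raise: outside Pre_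
    (List.replicate valid_areas.length none)

-- ===== PORT B =====
-- 'for r in area: lst = index.setdefault(r, []); if not lst or lst[-1] != j: lst.append(j)'
def addArea (d : PySem.Dict Int (List Int)) (j : Int) (area : List Int) : PySem.Dict Int (List Int) :=
  area.foldl (fun d r =>
    if (d.getD r []).getLast? = some j then d else d.insert r (d.getD r [] ++ [j])) d

-- 'for j, area in enumerate(valid_areas): …'
def buildIndex : List (List Int) → Int → PySem.Dict Int (List Int) → PySem.Dict Int (List Int)
  | [], _, d => d
  | area :: rest, j, d => buildIndex rest (j + 1) (addArea d j area)

-- two-pointer: smallest common element of two strictly increasing lists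
def firstCommon : List Int → List Int → Option Int
  | [], _ => none
  | _ :: _, [] => none
  | x :: xs, y :: ys =>
    if x = y then some x
    else if x < y then firstCommon xs (y :: ys)
    else firstCommon (x :: xs) ys
termination_by xs ys => xs.length + ys.length

def get_va_containing_hs_inds_alt (valid_areas : List (List Int)) (hotspots : List (List Int)) (verbose : Bool) : List (Option (List Int)) :=
  let idx := buildIndex valid_areas 0 PySem.Dict.empty
  (PySem.List.enumerate hotspots 0).foldl (fun res p =>
    -- r1 = hotspot[0]; r2 = hotspot[-1] (none = IndexError, outside Pre_)
    ((PySem.List.pyGet? p.2 0).bind (fun r1 =>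
      (PySem.List.pyGet? p.2 (-1)).map (fun r2 =>
        firstCommon (idx.getD r1 []) (idx.getD r2 [])))).elim res (fun j? =>
      j?.elim res (fun j =>
        res.set j.toNat (some (((res.getD j.toNat none).getD []) ++ [p.1])))))
    (List.replicate valid_areas.length none)

-- ===== PRECONDITION & SPEC =====
-- Pre_ excludes hotspot lists containing an empty hotspot: there Python A raises IndexError on hotspot[0].
def Pre_get_va_containing_hs_inds (valid_areas : List (List Int)) (hotspots : List (List Int)) (verbose : Bool) : Prop :=
  ∀ hs ∈ hotspots, hs ≠ []
instance (valid_areas : List (List Int)) (hotspots : List (List Int)) (verbose : Bool) : Decidable (Pre_get_va_containing_hs_inds valid_areas hotspots verbose) := by unfold Pre_get_va_containing_hs_inds; infer_instance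

def pvWitness_get_va_containing_hs_inds : List (List Int) × List (List Int) × Bool :=
  ([[1, 2], [3, 4]], [[1, 2], [4], [9]], false)

def Spec_get_va_containing_hs_inds (valid_areas : List (List Int)) (hotspots : List (List Int)) (verbose : Bool) (out : List (Option (List Int))) : Prop := out = get_va_containing_hs_inds_alt valid_areas hotspots verbose
instance (valid_areas : List (List Int)) (hotspots : List (List Int)) (verbose : Bool) (out : List (Option (List Int))) : Decidable (Spec_get_va_containing_hs_inds valid_areas hotspots verbose out) := by unfold Spec_get_va_containing_hs_inds; infer_instance

-- ===== CLAIM (what is proved, stated in full; the proofs are below) =====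
def Claim_equal_get_va_containing_hs_inds : Prop := ∀ (valid_areas : List (List Int)) (hotspots : List (List Int)) (verbose : Bool), Dom_get_va_containing_hs_inds valid_areas hotspots verbose → Pre_get_va_containing_hs_inds valid_areas hotspots verbose → Spec_get_va_containing_hs_inds valid_areas hotspots verbose (get_va_containing_hs_inds valid_areas hotspots verbose)

-- ===== LEMMAS AND PROOFS =====

-- proof-side characterisation of B's index: the indices (from j) of areas containing r
def idxList (r : Int) : List (List Int) → Int → List Int
  | [], _ => []
  | a :: rest, j => (if r ∈ a then [j] else []) ++ idxList r rest (j + 1)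

-- indices (from j) of areas containing both r1 and r2
def idxList2 (r1 r2 : Int) : List (List Int) → Int → List Int
  | [], _ => []
  | a :: rest, j => (if r1 ∈ a ∧ r2 ∈ a then [j] else []) ++ idxList2 r1 r2 rest (j + 1)

lemma getD_addArea (j : Int) (r : Int) : ∀ (area : List Int) (d : PySem.Dict Int (List Int)),
    (addArea d j area).getD r [] =
      if r ∈ area ∧ (d.getD r []).getLast? ≠ some j then d.getD r [] ++ [j] else d.getD r [] := by
  intro area
  induction area with
  | nil => intro d; simp [addArea]
  | cons r' rest ih =>
    intro d
    have hstep : addArea d j (r' :: rest) =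
        addArea (if (d.getD r' []).getLast? = some j then d
                 else d.insert r' (d.getD r' [] ++ [j])) j rest := by
      simp only [addArea, List.foldl_cons]
    rw [hstep]
    by_cases hr : r' = r
    · subst hr
      by_cases hlast : (d.getD r' []).getLast? = some j
      · rw [if_pos hlast, ih d]
        simp [hlast]
      · rw [if_neg hlast, ih, PySem.Dict.getD_insert_self]
        simp [hlast]
    · by_cases hlast : (d.getD r' []).getLast? = some j
      · rw [if_pos hlast, ih d]
        have hmem : (r ∈ r' :: rest) ↔ (r ∈ rest) := by
          constructor
          · intro h; rcases List.mem_cons.mp h with h | h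
            · exact absurd h.symm hr
            · exact h
          · exact fun h => List.mem_cons_of_mem _ h
        by_cases hm : r ∈ rest <;> simp [hm, hmem]
      · rw [if_neg hlast, ih]
        have hne : r ≠ r' := fun h => hr h.symm
        rw [PySem.Dict.getD_insert, if_neg hne]
        have hmem : (r ∈ r' :: rest) ↔ (r ∈ rest) := by
          constructor
          · intro h; rcases List.mem_cons.mp h with h | h
            · exact absurd h.symm hr
            · exact h
          · exact fun h => List.mem_cons_of_mem _ h
        by_cases hm : r ∈ rest <;> simp [hm, hmem]

lemma getD_buildIndex (r : Int) : ∀ (vas : List (List Int)) (j : Int) (d : PySem.Dict Int (List Int)),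
    (∀ x ∈ d.getD r [], x < j) →
    (buildIndex vas j d).getD r [] = d.getD r [] ++ idxList r vas j := by
  intro vas
  induction vas with
  | nil => intro j d _; simp [buildIndex, idxList]
  | cons a rest ih =>
    intro j d hlt
    have hlast : (d.getD r []).getLast? ≠ some j := by
      intro h
      have := hlt j (List.mem_of_getLast? h)
      omega
    have hA : (addArea d j a).getD r [] = d.getD r [] ++ (if r ∈ a then [j] else []) := by
      rw [getD_addArea]
      by_cases hm : r ∈ a <;> simp [hm, hlast]
    have hlt' : ∀ x ∈ (addArea d j a).getD r [], x < j + 1 := by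
      intro x hx
      rw [hA] at hx
      rcases List.mem_append.mp hx with h | h
      · have := hlt x h; omega
      · by_cases hm : r ∈ a <;> simp [hm] at h; omega
    show (buildIndex rest (j + 1) (addArea d j a)).getD r [] = _
    rw [ih (j + 1) _ hlt', hA, idxList, List.append_assoc]

lemma getD_buildIndex_empty (r : Int) (vas : List (List Int)) :
    (buildIndex vas 0 PySem.Dict.empty).getD r [] = idxList r vas 0 := by
  rw [getD_buildIndex r vas 0 PySem.Dict.empty (by simp [PySem.Dict.getD_empty])]
  simp [PySem.Dict.getD_empty]

lemma idxList_ge (r : Int) : ∀ (vas : List (List Int)) (j : Int), ∀ x ∈ idxList r vas j, j ≤ x := by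
  intro vas
  induction vas with
  | nil => intro j x hx; simp [idxList] at hx
  | cons a rest ih =>
    intro j x hx
    simp only [idxList, List.mem_append] at hx
    rcases hx with h | h
    · by_cases hm : r ∈ a <;> simp [hm] at h; omega
    · have := ih (j + 1) x h; omega

lemma idxList_pairwise (r : Int) : ∀ (vas : List (List Int)) (j : Int), (idxList r vas j).Pairwise (· < ·) := by
  intro vas
  induction vas with
  | nil => intro j; simp [idxList]
  | cons a rest ih =>
    intro j
    simp only [idxList]
    apply List.pairwise_append.mpr
    refine ⟨?_, ih (j + 1), ?_⟩
    · by_cases hm : r ∈ a <;> simp [hm]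
    · intro x hx y hy
      by_cases hm : r ∈ a <;> simp [hm] at hx
      have := idxList_ge r rest (j + 1) y hy
      omega

lemma firstCommon_eq_head_filter : ∀ (xs ys : List Int), xs.Pairwise (· < ·) → ys.Pairwise (· < ·) →
    firstCommon xs ys = (xs.filter (fun x => decide (x ∈ ys))).head? := by
  intro xs ys hxs hys
  fun_induction firstCommon xs ys with
  | case1 ys => simp
  | case2 x xs => simp
  | case3 xs y ys =>
    simp
  | case4 x xs y ys hne hlt ih =>
    have hxs' := List.Pairwise.of_cons hxs
    have hnm : x ∉ y :: ys := by
      intro h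
      rcases List.mem_cons.mp h with h | h
      · exact hne h
      · have := (List.pairwise_cons.mp hys).1 x h
        omega
    rw [List.filter_cons_of_neg (by simpa using hnm)]
    exact ih hxs' hys
  | case5 x xs y ys hne hnlt ih =>
    have hys' := List.Pairwise.of_cons hys
    have hgt : y < x := by omega
    have hfe : (x :: xs).filter (fun z => decide (z ∈ y :: ys)) =
        (x :: xs).filter (fun z => decide (z ∈ ys)) := by
      apply List.filter_congr
      intro z hz
      have hzx : x ≤ z := by
        rcases List.mem_cons.mp hz with h | h
        · omega
        · have := (List.pairwise_cons.mp hxs).1 z h; omega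
      have hzy : z ≠ y := by omega
      simp [List.mem_cons, hzy]
    rw [hfe]
    exact ih hxs hys'

lemma filter_idxList (r1 r2 : Int) : ∀ (vas : List (List Int)) (j : Int),
    (idxList r1 vas j).filter (fun x => decide (x ∈ idxList r2 vas j)) = idxList2 r1 r2 vas j := by
  intro vas
  induction vas with
  | nil => intro j; simp [idxList, idxList2]
  | cons a rest ih =>
    intro j
    simp only [idxList, idxList2, List.filter_append]
    have hjnot : j ∉ idxList r2 rest (j + 1) := by
      intro h
      have := idxList_ge r2 rest (j + 1) j h
      omega
    congr 1
    · by_cases h1m : r1 ∈ a <;> by_cases h2m : r2 ∈ a <;>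
        simp [h1m, h2m, hjnot]
    · refine (List.filter_congr ?_).trans (ih (j + 1))
      intro z hz
      have hzj : j + 1 ≤ z := idxList_ge r1 rest (j + 1) z hz
      have hzne : z ≠ j := by omega
      by_cases h2m : r2 ∈ a <;> simp [h2m, List.mem_cons, hzne]

lemma head_idxList2 (r1 r2 : Int) : ∀ (vas : List (List Int)) (jn : Nat),
    (idxList2 r1 r2 vas (jn : Int)).head? = (findFirstA r1 r2 vas jn).map (fun n : Nat => (n : Int)) := by
  intro vas
  induction vas with
  | nil => intro jn; simp [idxList2, findFirstA]
  | cons a rest ih =>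
    intro jn
    simp only [idxList2, findFirstA]
    by_cases hc : r1 ∈ a ∧ r2 ∈ a
    · simp [hc]
    · have : ((jn : Int) + 1) = ((jn + 1 : Nat) : Int) := by push_cast; ring
      simp only [hc, if_false, List.nil_append, this]
      exact ih (jn + 1)

lemma firstCommon_key (vas : List (List Int)) (r1 r2 : Int) :
    firstCommon ((buildIndex vas 0 PySem.Dict.empty).getD r1 [])
                ((buildIndex vas 0 PySem.Dict.empty).getD r2 []) =
      (findFirstA r1 r2 vas 0).map (fun n : Nat => (n : Int)) := by
  rw [getD_buildIndex_empty, getD_buildIndex_empty]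
  rw [firstCommon_eq_head_filter _ _ (idxList_pairwise r1 vas 0) (idxList_pairwise r2 vas 0)]
  rw [filter_idxList]
  exact head_idxList2 r1 r2 vas 0

lemma ports_eq (valid_areas hotspots : List (List Int)) (verbose : Bool) :
    get_va_containing_hs_inds valid_areas hotspots verbose =
      get_va_containing_hs_inds_alt valid_areas hotspots verbose := by
  unfold get_va_containing_hs_inds get_va_containing_hs_inds_alt
  congr 1
  funext res p
  cases h0 : PySem.List.pyGet? p.2 0 with
  | none => rfl
  | some r1 =>
    cases h1 : PySem.List.pyGet? p.2 (-1) with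
    | none => rfl
    | some r2 =>
      simp only [Option.bind_some, Option.map_some, Option.elim_some]
      rw [firstCommon_key valid_areas r1 r2]
      cases hf : findFirstA r1 r2 valid_areas 0 with
      | none => rfl
      | some n => simp [markAt]

-- ===== VERDICT (by name: the statement is the Claim_ definition above) =====
theorem get_va_containing_hs_inds_spec : Claim_equal_get_va_containing_hs_inds := by
  intro valid_areas hotspots verbose _ _
  unfold Spec_get_va_containing_hs_inds
  exact ports_eq valid_areas hotspots verbose
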